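-- pv_equiv track=rewrite | github.com/eunseo-kim/Algorithm | programmers/2022 KAKAO BLIND RECRUITMENT/4.py | solution
-- ===== SOURCE A (Python) =====
-- def solution(n, apeach):
--     dp = [[] for i in range(11)]
--     dp[0] = [[n - (apeach[0] + 1), [apeach[0] + 1]], [n, [0]]]
--
--     for i in range(1, 10):
--         for d in dp[i - 1]:
--             turn_left, ryan = d
--             dp[i].append([turn_left - (apeach[i] + 1), ryan + [apeach[i] + 1]])
--             dp[i].append([turn_left, ryan + [0]])
--
--     result = []
--     max_subscore = 0
--
--     for d in dp[9]:
--         turn_left, ryan = d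
--
--         if turn_left >= 0:
--             ryan = ryan + [turn_left]
--             subscore = get_score(apeach, ryan)
--
--             if subscore > 0:
--                 if subscore > max_subscore:
--                     result = [ryan[::-1]]
--                     max_subscore = subscore
--                 elif subscore == max_subscore:
--                     result.append(ryan[::-1])
--
--     if result == []:
--         return [-1]
--
--     result = sorted(result, reverse=True)
--     return result[0][::-1]
--
-- def get_score(apeach, ryan):
--     apeach_score = 0
--     ryan_score = 0
--     for i in range(11):
--         if apeach[i] == 0 and ryan[i] == 0:
--             continue
--         if apeach[i] >= ryan[i]:
--             apeach_score += 10 - i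
--         elif apeach[i] < ryan[i]:
--             ryan_score += 10 - i
--
--     return ryan_score - apeach_score
-- ===== SOURCE B (Python) =====
-- def solution(n, apeach):
--     def go(scores, left, ryan, best):
--         if not scores:
--             if left < 0:
--                 return best
--             full = ryan + [left]
--             s = get_score(apeach, full)
--             if s > 0:
--                 key = (s, full[::-1])
--                 if best is None or key > best:
--                     return key
--             return best
--         a = scores[0] + 1
--         best = go(scores[1:], left - a, ryan + [a], best)
--         return go(scores[1:], left, ryan + [0], best)
--
--     best = go(apeach[:10], n, [], None)
--     return best[1][::-1] if best is not None else [-1]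
--
-- def get_score(apeach, ryan):
--     apeach_score = 0
--     ryan_score = 0
--     for i in range(11):
--         if apeach[i] == 0 and ryan[i] == 0:
--             continue
--         if apeach[i] >= ryan[i]:
--             apeach_score += 10 - i
--         elif apeach[i] < ryan[i]:
--             ryan_score += 10 - i
--
--     return ryan_score - apeach_score
-- ===== Notes on version B (the rewrite author's own statement) =====
-- stated objective: simpler
-- what changed: B drops A's 11-layer dp table and its collect-all-ties-then-sort selection: a direct recursion over the ten scores enumerates the same allocations while threading a running maximum (score, reversed-allocation) key, so no intermediate layers are stored and no final sort is needed.
-- outside the precondition, e.g. on solution(-1, [0, 0, 0, 0, 0, 0, 0, 0, 0, 0]): A returns [-1], B returns [-1]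
import Mathlib
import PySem

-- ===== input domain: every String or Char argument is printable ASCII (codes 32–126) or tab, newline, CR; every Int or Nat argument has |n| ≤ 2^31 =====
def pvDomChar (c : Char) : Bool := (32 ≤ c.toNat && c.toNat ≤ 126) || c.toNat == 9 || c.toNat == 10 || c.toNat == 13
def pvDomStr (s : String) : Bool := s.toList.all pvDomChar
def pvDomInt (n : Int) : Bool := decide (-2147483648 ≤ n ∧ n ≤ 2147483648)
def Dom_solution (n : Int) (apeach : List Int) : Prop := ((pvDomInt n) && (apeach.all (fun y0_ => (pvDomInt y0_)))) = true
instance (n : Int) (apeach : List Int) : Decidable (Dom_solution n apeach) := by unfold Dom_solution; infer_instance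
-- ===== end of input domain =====

-- B replaces A's layered dp table + collect-ties-and-sort selection by a direct recursion over
-- the ten scores threading a running maximum (score, reversed-allocation) key: simpler, no dp
-- storage and no final sort.

-- ===== PORT A =====
-- get_score(apeach, ryan); Python's final 'elif apeach[i] < ryan[i]' is the exhaustive else of
-- 'if apeach[i] >= ryan[i]', ported as else.  (Source B defines the identical helper; shared.)
def get_score (apeach : List Int) (ryan : List Int) : Int :=
  let st := (PySem.List.pyRange 0 11 1).foldl
    (fun (st : Int × Int) i =>
      if PySem.List.pyGetD apeach i 0 = 0 ∧ PySem.List.pyGetD ryan i 0 = 0 then st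
      else if PySem.List.pyGetD apeach i 0 ≥ PySem.List.pyGetD ryan i 0 then (st.1 + (10 - i), st.2)
      else (st.1, st.2 + (10 - i)))
    (0, 0)
  st.2 - st.1

-- dp is a list of 11 layers; dp[i] assignments use .set/.getD with indices 0 ≤ i ≤ 9 from
-- range(1,10) (i.toNat is exact there).  ryan[::-1] is List.reverse (PySem.List.slice?_none_none_neg_one).
def solution (n : Int) (apeach : List Int) : List Int :=
  let dp0 : List (List (Int × List Int)) := List.replicate 11 []
  let a0 := PySem.List.pyGetD apeach 0 0
  let dp1 := dp0.set 0 [(n - (a0 + 1), [a0 + 1]), (n, [0])]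
  let dp := (PySem.List.pyRange 1 10 1).foldl
    (fun dp i =>
      let ai := PySem.List.pyGetD apeach i 0
      dp.set i.toNat
        ((dp.getD (i - 1).toNat []).foldl
          (fun acc d => (acc ++ [(d.1 - (ai + 1), d.2 ++ [ai + 1])]) ++ [(d.1, d.2 ++ [0])]) []))
    dp1
  let fin := (dp.getD 9 []).foldl
    (fun (st : List (List Int) × Int) d =>
      if d.1 ≥ 0 then
        let ryan := d.2 ++ [d.1]
        let subscore := get_score apeach ryan
        if subscore > 0 then
          if subscore > st.2 then ([ryan.reverse], subscore)
          else if subscore = st.2 then (st.1 ++ [ryan.reverse], st.2)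
          else st
        else st
      else st)
    ([], 0)
  if fin.1 = [] then [-1]
  else (PySem.List.pyGetD (PySem.List.sorted fin.1 (fun r => r) true) 0 []).reverse

-- ===== PORT B =====
-- Python's list comparison (lexicographic, shorter prefix first)
def pyListLt : List Int → List Int → Bool
  | _, [] => false
  | [], _ :: _ => true
  | a :: as, b :: bs => if a < b then true else if b < a then false else pyListLt as bs

-- Python's 'key > best' on (int, list) pairs
def keyGt (k b : Int × List Int) : Bool :=
  if k.1 > b.1 then true else if k.1 < b.1 then false else pyListLt b.2 k.2

-- the inner recursion go(scores, left, ryan, best) of Source B (apeach is the captured closure var)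
def go (apeach : List Int) : List Int → Int → List Int → Option (Int × List Int) → Option (Int × List Int)
  | [], left, ryan, best =>
      if left < 0 then best
      else
        let full := ryan ++ [left]
        let s := get_score apeach full
        if s > 0 then
          let key := (s, full.reverse)
          match best with
          | none => some key
          | some b => if keyGt key b then some key else some b
        else best
  | a0 :: rest, left, ryan, best =>
      let a := a0 + 1
      let best' := go apeach rest (left - a) (ryan ++ [a]) best
      go apeach rest left (ryan ++ [0]) best'

def solution_alt (n : Int) (apeach : List Int) : List Int :=
  let best := go apeach (PySem.List.slice apeach none (some 10)) n [] none
  match best with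
  | some k => k.2.reverse
  | none => [-1]

-- ===== PRECONDITION & SPEC =====
-- A reads apeach[0..9] while building dp and apeach[10] inside get_score: on lists shorter than
-- 11 it raises IndexError whenever any allocation is feasible (in particular always when n ≥ 0);
-- only on short lists where no allocation fits does A happen to return [-1] without the access,
-- so Pre_ requires length ≥ 11 (the problem's fixed 11 zones).
def Pre_solution (n : Int) (apeach : List Int) : Prop := 11 ≤ apeach.length
instance (n : Int) (apeach : List Int) : Decidable (Pre_solution n apeach) := by unfold Pre_solution; infer_instance
def pvWitness_solution : Int × List Int := (5, [2, 1, 1, 1, 0, 0, 0, 0, 0, 0, 0])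

def Spec_solution (n : Int) (apeach : List Int) (out : List Int) : Prop := out = solution_alt n apeach
instance (n : Int) (apeach : List Int) (out : List Int) : Decidable (Spec_solution n apeach out) := by unfold Spec_solution; infer_instance

-- ===== CLAIM (what is proved, stated in full; the proofs are below) =====
def Claim_equal_solution : Prop := ∀ (n : Int) (apeach : List Int), Dom_solution n apeach → Pre_solution n apeach → Spec_solution n apeach (solution n apeach)

-- ===== LEMMAS AND PROOFS =====

-- the candidate tree both programs enumerate, in the common left-to-right order
def cands : List Int → Int → List Int → List (Int × List Int)
  | [], left, ryan => [(left, ryan)]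
  | a :: rest, left, ryan =>
      cands rest (left - (a + 1)) (ryan ++ [a + 1]) ++ cands rest left (ryan ++ [0])

-- one dp expansion step (the two appends of A's inner loop, as a flatMap block)
def expandStep (a : Int) (d : Int × List Int) : List (Int × List Int) :=
  [(d.1 - (a + 1), d.2 ++ [a + 1]), (d.1, d.2 ++ [0])]

def iterLayer : List Int → List (Int × List Int) → List (Int × List Int)
  | [], L => L
  | a :: rest, L => iterLayer rest (L.flatMap (expandStep a))

theorem iterLayer_append (as : List Int) (L1 L2 : List (Int × List Int)) :
    iterLayer as (L1 ++ L2) = iterLayer as L1 ++ iterLayer as L2 := by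
  induction as generalizing L1 L2 with
  | nil => rfl
  | cons a rest ih => simp [iterLayer, List.flatMap_append, ih]

theorem iterLayer_single (as : List Int) (l : Int) (r : List Int) :
    iterLayer as [(l, r)] = cands as l r := by
  induction as generalizing l r with
  | nil => rfl
  | cons a rest ih =>
      show iterLayer rest ([(l - (a + 1), r ++ [a + 1])] ++ [(l, r ++ [0])]) = _
      rw [iterLayer_append, ih, ih, cands]

-- A's inner two-append loop builds exactly the flatMap of expandStep
theorem layer_eq (a : Int) (L : List (Int × List Int)) :
    L.foldl (fun acc d => (acc ++ [(d.1 - (a + 1), d.2 ++ [a + 1])]) ++ [(d.1, d.2 ++ [0])]) []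
      = L.flatMap (expandStep a) := by
  have h2 : L.foldl (fun acc x => acc ++ expandStep a x) [] = [] ++ L.flatMap (expandStep a) :=
    PySem.List.foldl_append_eq_flatMap (expandStep a) L []
  rw [PySem.List.foldl_congr_mem L _ (fun acc x => acc ++ expandStep a x) []
      (by intro acc x _; simp [expandStep]), h2]
  rfl

-- A's dp-update step (the zeta-expanded body of A's outer loop)
def dpF (ap : List Int) (dp : List (List (Int × List Int))) (i : Int) : List (List (Int × List Int)) :=
  dp.set i.toNat
    ((dp.getD (i - 1).toNat []).foldl
      (fun acc d =>
        (acc ++ [(d.1 - (PySem.List.pyGetD ap i 0 + 1), d.2 ++ [PySem.List.pyGetD ap i 0 + 1])])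
          ++ [(d.1, d.2 ++ [0])]) [])

theorem dp_fold_inv (ap : List Int) : ∀ (k : Nat) (i : Int), i = 10 - (k : Int) → 1 ≤ i →
    ∀ dp : List (List (Int × List Int)), dp.length = 11 →
    ((PySem.List.pyRange i 10 1).foldl (dpF ap) dp).getD 9 []
      = iterLayer ((PySem.List.pyRange i 10 1).map (fun j => PySem.List.pyGetD ap j 0))
          (dp.getD (i - 1).toNat []) := by
  intro k
  induction k with
  | zero =>
      intro i hi h1 dp hl
      have h10 : i = 10 := by omega
      subst h10
      rw [PySem.List.pyRange_one_eq_nil (by omega)]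
      rfl
  | succ k ih =>
      intro i hi h1 dp hl
      rw [PySem.List.pyRange_one_cons (by omega)]
      simp only [List.foldl_cons, List.map_cons]
      rw [iterLayer]
      rw [ih (i + 1) (by omega) (by omega) (dpF ap dp i) (by simp [dpF, hl])]
      have he : i + 1 - 1 = i := by ring
      rw [he]
      congr 1
      unfold dpF
      have hlt : i.toNat < dp.length := by omega
      rw [layer_eq (PySem.List.pyGetD ap i 0)]
      simp [List.getD, hlt]

-- A's selection step and B's selection step (zeta-expanded bodies of the ports' final passes)
def stepA (ap : List Int) (st : List (List Int) × Int) (d : Int × List Int) :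
    List (List Int) × Int :=
  if d.1 ≥ 0 then
    if get_score ap (d.2 ++ [d.1]) > 0 then
      if get_score ap (d.2 ++ [d.1]) > st.2 then ([(d.2 ++ [d.1]).reverse], get_score ap (d.2 ++ [d.1]))
      else if get_score ap (d.2 ++ [d.1]) = st.2 then (st.1 ++ [(d.2 ++ [d.1]).reverse], st.2)
      else st
    else st
  else st

def stepB (ap : List Int) (best : Option (Int × List Int)) (d : Int × List Int) :
    Option (Int × List Int) :=
  if d.1 < 0 then best
  else if get_score ap (d.2 ++ [d.1]) > 0 then
    match best with
    | none => some (get_score ap (d.2 ++ [d.1]), (d.2 ++ [d.1]).reverse)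
    | some b =>
        if keyGt (get_score ap (d.2 ++ [d.1]), (d.2 ++ [d.1]).reverse) b then
          some (get_score ap (d.2 ++ [d.1]), (d.2 ++ [d.1]).reverse)
        else some b
  else best

theorem go_eq_foldl (ap : List Int) (rest : List Int) :
    ∀ (left : Int) (ryan : List Int) (best : Option (Int × List Int)),
    go ap rest left ryan best = (cands rest left ryan).foldl (stepB ap) best := by
  induction rest with
  | nil => intro left ryan best; rfl
  | cons a rest ih =>
      intro left ryan best
      show go ap rest left (ryan ++ [0]) (go ap rest (left - (a + 1)) (ryan ++ [a + 1]) best) = _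
      rw [ih, ih, cands, List.foldl_append]

-- reduction shapes of stepB
theorem stepB_none (ap : List Int) (d : Int × List Int) :
    stepB ap none d =
      if d.1 < 0 then none
      else if get_score ap (d.2 ++ [d.1]) > 0 then
        some (get_score ap (d.2 ++ [d.1]), (d.2 ++ [d.1]).reverse)
      else none := rfl

theorem stepB_some (ap : List Int) (d : Int × List Int) (k : Int × List Int) :
    stepB ap (some k) d =
      if d.1 < 0 then some k
      else if get_score ap (d.2 ++ [d.1]) > 0 then
        (if keyGt (get_score ap (d.2 ++ [d.1]), (d.2 ++ [d.1]).reverse) k then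
          some (get_score ap (d.2 ++ [d.1]), (d.2 ++ [d.1]).reverse)
        else some k)
      else some k := rfl

-- pyListLt is Python's list comparison = the lexicographic strict order on List Int
theorem pyListLt_iff (x y : List Int) : pyListLt x y = true ↔ x < y := by
  induction x generalizing y with
  | nil =>
      cases y with
      | nil => simp [pyListLt]
      | cons b bs => simp [pyListLt]
  | cons a as ih =>
      cases y with
      | nil => simp [pyListLt]
      | cons b bs =>
          simp only [pyListLt, List.cons_lt_cons_iff]
          by_cases h1 : a < b
          · simp [h1]
          · by_cases h2 : b < a
            · simp [h1, h2]
              exact fun h => absurd h (by omega)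
            · have hab : a = b := by omega
              subst hab
              simp [ih]

-- the invariant coupling A's (result, max_subscore) state with B's running best
def ABInv (st : List (List Int) × Int) (b : Option (Int × List Int)) : Prop :=
  (st.1 = [] ∧ st.2 = 0 ∧ b = none) ∨
  (∃ m L, b = some (m, L) ∧ st.2 = m ∧ 0 < m ∧ L ∈ st.1 ∧ ∀ x ∈ st.1, x ≤ L)

theorem ABInv_step (ap : List Int) (st : List (List Int) × Int)
    (b : Option (Int × List Int)) (d : Int × List Int) (h : ABInv st b) :
    ABInv (stepA ap st d) (stepB ap b d) := by
  by_cases hneg : d.1 < 0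
  · unfold stepA stepB
    rw [if_neg (by omega : ¬ d.1 ≥ 0), if_pos hneg]
    exact h
  · have hge : d.1 ≥ 0 := by omega
    unfold stepA
    rw [if_pos hge]
    by_cases hpos : get_score ap (d.2 ++ [d.1]) > 0
    case neg =>
      rw [if_neg hpos]
      unfold stepB
      rw [if_neg hneg, if_neg hpos]
      rcases h with ⟨h1, h2, rfl⟩ | ⟨m, L, rfl, h2, hm, hmem, hmax⟩
      · exact Or.inl ⟨h1, h2, rfl⟩
      · exact Or.inr ⟨m, L, rfl, h2, hm, hmem, hmax⟩
    rw [if_pos hpos]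
    rcases h with ⟨h1, h2, rfl⟩ | ⟨m, L, rfl, h2, hm, hmem, hmax⟩
    · rw [stepB_none, if_neg hneg, if_pos hpos, h2, if_pos hpos]
      refine Or.inr ⟨_, _, rfl, rfl, hpos, by simp, ?_⟩
      intro x hx
      simp at hx
      simp [hx]
    · rw [stepB_some, if_neg hneg, if_pos hpos, h2]
      by_cases hgt : get_score ap (d.2 ++ [d.1]) > m
      · rw [if_pos hgt, if_pos (by simp [keyGt, hgt] : keyGt (get_score ap (d.2 ++ [d.1]), (d.2 ++ [d.1]).reverse) (m, L) = true)]
        refine Or.inr ⟨_, _, rfl, rfl, hpos, by simp, ?_⟩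
        intro x hx
        simp at hx
        simp [hx]
      · rw [if_neg hgt]
        by_cases heq : get_score ap (d.2 ++ [d.1]) = m
        · rw [if_pos heq]
          have hk : keyGt (get_score ap (d.2 ++ [d.1]), (d.2 ++ [d.1]).reverse) (m, L)
              = pyListLt L (d.2 ++ [d.1]).reverse := by
            simp only [keyGt]
            rw [if_neg (by omega), if_neg (by omega)]
          by_cases hlt : pyListLt L (d.2 ++ [d.1]).reverse = true
          · rw [if_pos (hk.trans hlt)]
            refine Or.inr ⟨_, _, rfl, by omega, hpos, by simp, ?_⟩
            intro x hx
            rcases List.mem_append.mp hx with hx | hx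
            · exact le_of_lt (lt_of_le_of_lt (hmax x hx) ((pyListLt_iff _ _).mp hlt))
            · rw [List.mem_singleton] at hx
              exact le_of_eq hx
          · rw [if_neg (fun hc => hlt (hk ▸ hc))]
            refine Or.inr ⟨m, L, rfl, rfl, hm, List.mem_append_left _ hmem, ?_⟩
            intro x hx
            rcases List.mem_append.mp hx with hx | hx
            · exact hmax x hx
            · rw [List.mem_singleton] at hx
              subst hx
              exact not_lt.mp (fun hc => hlt ((pyListLt_iff _ _).mpr hc))
        · rw [if_neg heq]
          have hk : keyGt (get_score ap (d.2 ++ [d.1]), (d.2 ++ [d.1]).reverse) (m, L) = false := by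
            simp only [keyGt]
            rw [if_neg hgt, if_pos (by omega)]
          rw [if_neg (by rw [hk]; exact Bool.false_ne_true)]
          exact Or.inr ⟨m, L, rfl, h2, hm, hmem, hmax⟩

theorem ABInv_foldl (ap : List Int) (C : List (Int × List Int)) :
    ∀ (st : List (List Int) × Int) (b : Option (Int × List Int)), ABInv st b →
    ABInv (C.foldl (stepA ap) st) (C.foldl (stepB ap) b) := by
  induction C with
  | nil => intro st b h; exact h
  | cons d C ih => intro st b h; exact ih _ _ (ABInv_step ap st b d h)

-- head of the reverse-sorted result list is its maximum
theorem sorted_head_max (res : List (List Int)) (L : List Int)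
    (hmem : L ∈ res) (hmax : ∀ x ∈ res, x ≤ L) :
    PySem.List.pyGetD (PySem.List.sorted res (fun r => r) true) 0 [] = L := by
  have hperm := PySem.List.sorted_perm res (fun r => r) true
  -- sorted_pairwise_rev is stated with the LinearOrder-derived instances; bridge them
  have hpw : List.Pairwise (fun (a b : List Int) => b ≤ a) (PySem.List.sorted res (fun r => r) true) := by
    have hdec : (fun (a b : List Int) => a.decidableLT b)
        = (@LinearOrder.toDecidableLT (List Int) List.instLinearOrder) := by
      funext a b; exact Subsingleton.elim _ _
    rw [show (@PySem.List.sorted (List Int) (List Int) List.instLT (fun a b => a.decidableLT b))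
        = (@PySem.List.sorted (List Int) (List Int) List.instLinearOrder.toLT
            (@LinearOrder.toDecidableLT (List Int) List.instLinearOrder)) from by rw [hdec]]
    exact PySem.List.sorted_pairwise_rev res (fun r => r)
  cases hsrt : PySem.List.sorted res (fun r => r) true with
  | nil =>
      rw [hsrt] at hperm
      exact absurd hmem (by simp [← hperm.mem_iff])
  | cons hd tl =>
      rw [hsrt] at hperm hpw
      have hhd : hd ∈ res := hperm.mem_iff.mp (by simp)
      have hL : L ∈ hd :: tl := hperm.mem_iff.mpr hmem
      have hle : hd ≤ L := hmax hd hhd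
      have hge : L ≤ hd := by
        rcases List.mem_cons.mp hL with rfl | hL2
        · exact le_refl _
        · exact (List.pairwise_cons.mp hpw).1 L hL2
      rw [PySem.List.pyGetD_zero_cons]
      exact le_antisymm hle hge

-- the whole final pass of A equals the whole selection of B, over any common candidate list
theorem final_eq (ap : List Int) (C : List (Int × List Int)) :
    (if (C.foldl (stepA ap) ([], 0)).1 = [] then [-1]
     else (PySem.List.pyGetD (PySem.List.sorted (C.foldl (stepA ap) ([], 0)).1 (fun r => r) true) 0 []).reverse)
      = (match C.foldl (stepB ap) none with
         | some k => k.2.reverse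
         | none => ([-1] : List Int)) := by
  have h := ABInv_foldl ap C ([], 0) none (Or.inl ⟨rfl, rfl, rfl⟩)
  rcases h with ⟨h1, _, h3⟩ | ⟨m, L, h3, _, _, hmem, hmax⟩
  · rw [h3, if_pos h1]
  · have hne : (C.foldl (stepA ap) ([], 0)).1 ≠ [] := List.ne_nil_of_mem hmem
    rw [h3, if_neg hne, sorted_head_max _ L hmem hmax]

-- the ports, written as their zeta-expanded bodies (both are definitional)
theorem solutionA_eq (n : Int) (ap : List Int) :
    solution n ap =
      (if ((((PySem.List.pyRange 1 10 1).foldl (dpF ap)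
              ((List.replicate 11 []).set 0
                [(n - (PySem.List.pyGetD ap 0 0 + 1), [PySem.List.pyGetD ap 0 0 + 1]), (n, [0])])).getD 9 []).foldl
            (stepA ap) ([], 0)).1 = [] then [-1]
       else (PySem.List.pyGetD
              (PySem.List.sorted
                ((((PySem.List.pyRange 1 10 1).foldl (dpF ap)
                    ((List.replicate 11 []).set 0
                      [(n - (PySem.List.pyGetD ap 0 0 + 1), [PySem.List.pyGetD ap 0 0 + 1]), (n, [0])])).getD 9 []).foldl
                  (stepA ap) ([], 0)).1 (fun r => r) true) 0 []).reverse) := rfl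

theorem solutionB_eq (n : Int) (ap : List Int) :
    solution_alt n ap =
      (match go ap (PySem.List.slice ap none (some 10)) n [] none with
       | some k => k.2.reverse
       | none => [-1]) := rfl

theorem solution_main : ∀ (n : Int) (apeach : List Int), Dom_solution n apeach → Pre_solution n apeach →
    solution n apeach = solution_alt n apeach := by
  intro n apeach _ hp
  unfold Pre_solution at hp
  obtain ⟨x0, x1, x2, x3, x4, x5, x6, x7, x8, x9, x10, t, rfl⟩ :
      ∃ x0 x1 x2 x3 x4 x5 x6 x7 x8 x9 x10 t, apeach = x0::x1::x2::x3::x4::x5::x6::x7::x8::x9::x10::t := by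
    rcases apeach with _|⟨x0,_|⟨x1,_|⟨x2,_|⟨x3,_|⟨x4,_|⟨x5,_|⟨x6,_|⟨x7,_|⟨x8,_|⟨x9,_|⟨x10,t⟩⟩⟩⟩⟩⟩⟩⟩⟩⟩⟩ <;>
      first
        | exact ⟨x0, x1, x2, x3, x4, x5, x6, x7, x8, x9, x10, t, rfl⟩
        | (exfalso; simp at hp)
  rw [solutionA_eq, solutionB_eq]
  have hslice : PySem.List.slice (x0::x1::x2::x3::x4::x5::x6::x7::x8::x9::x10::t) none (some 10) = [x0,x1,x2,x3,x4,x5,x6,x7,x8,x9] := by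
    rw [PySem.List.slice_to _ (by norm_num)]
    rfl
  have hdp : (((PySem.List.pyRange 1 10 1).foldl (dpF (x0::x1::x2::x3::x4::x5::x6::x7::x8::x9::x10::t))
        ((List.replicate 11 []).set 0
          [(n - (PySem.List.pyGetD (x0::x1::x2::x3::x4::x5::x6::x7::x8::x9::x10::t) 0 0 + 1), [PySem.List.pyGetD (x0::x1::x2::x3::x4::x5::x6::x7::x8::x9::x10::t) 0 0 + 1]), (n, [0])])).getD 9 [])
      = cands [x0,x1,x2,x3,x4,x5,x6,x7,x8,x9] n [] := by
    rw [dp_fold_inv (x0::x1::x2::x3::x4::x5::x6::x7::x8::x9::x10::t) 9 1 (by norm_num) (by norm_num) _ (by simp)]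
    have hmap : (PySem.List.pyRange 1 10 1).map (fun j => PySem.List.pyGetD (x0::x1::x2::x3::x4::x5::x6::x7::x8::x9::x10::t) j 0)
        = [x1,x2,x3,x4,x5,x6,x7,x8,x9] := by
      rw [show PySem.List.pyRange 1 10 1 = [1,2,3,4,5,6,7,8,9] from by decide]
      simp [pysem]
    rw [hmap]
    have hd0 : ((List.replicate 11 ([] : List (Int × List Int))).set 0
        [(n - (PySem.List.pyGetD (x0::x1::x2::x3::x4::x5::x6::x7::x8::x9::x10::t) 0 0 + 1), [PySem.List.pyGetD (x0::x1::x2::x3::x4::x5::x6::x7::x8::x9::x10::t) 0 0 + 1]), (n, [0])]).getD ((1 : Int) - 1).toNat []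
        = [(n - (x0 + 1), [x0 + 1]), (n, [0])] := by
      rw [PySem.List.pyGetD_zero_cons]
      rfl
    rw [hd0]
    rw [show cands [x0,x1,x2,x3,x4,x5,x6,x7,x8,x9] n []
        = cands [x1,x2,x3,x4,x5,x6,x7,x8,x9] (n - (x0 + 1)) [x0 + 1]
            ++ cands [x1,x2,x3,x4,x5,x6,x7,x8,x9] n [0] from by rw [cands]; rfl]
    rw [← iterLayer_single, ← iterLayer_single, ← iterLayer_append]
    rfl
  rw [hslice, hdp, go_eq_foldl]
  exact final_eq (x0::x1::x2::x3::x4::x5::x6::x7::x8::x9::x10::t) (cands [x0,x1,x2,x3,x4,x5,x6,x7,x8,x9] n [])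

-- ===== VERDICT (by name: the statement is the Claim_ definition above) =====
theorem solution_spec : Claim_equal_solution := by
  intro n apeach hd hp
  unfold Spec_solution
  exact solution_main n apeach hd hp
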